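-- pv_equiv track=rewrite | github.com/ThreeMonth03/DSW_Translation_tool | src/tree_utils.py | render_translation_markdown
-- ===== SOURCE A (Python) =====
-- FIELD_EXPORT_ORDER = ("title", "label", "text", "advice", "description", "name", "url")
--
-- def sort_fields(fields):
--     return sorted(fields, key=lambda field: (FIELD_EXPORT_ORDER.index(field) if field in FIELD_EXPORT_ORDER else len(FIELD_EXPORT_ORDER), field))
--
-- def render_translation_markdown(entity_uuid, event_type, fields, source_lang="en", target_lang="zh_Hant"):
--     ordered_fields = sort_fields(fields.keys())
--     lines = [
--         "# Translation",
--         "",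
--         f"- UUID: `{entity_uuid}`",
--         f"- Event Type: `{event_type}`",
--         f"- Edit only the `Translation ({target_lang})` blocks below.",
--         "",
--     ]
--
--     for field in ordered_fields:
--         values = fields[field]
--         lines.extend(
--             [
--                 f"## {field}",
--                 "",
--                 f"### Source ({source_lang})",
--                 "",
--                 "~~~text",
--                 values.get("msgid", ""),
--                 "~~~",
--                 "",
--                 f"### Translation ({target_lang})",
--                 "",
--                 "~~~text",
--                 values.get("msgstr", ""),
--                 "~~~",
--                 "",
--             ]
--         )
--
--     return "\n".join(lines).rstrip() + "\n"
-- ===== SOURCE B (Python) =====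
-- FIELD_EXPORT_ORDER = ("title", "label", "text", "advice", "description", "name", "url")
--
-- def render_translation_markdown(entity_uuid, event_type, fields, source_lang="en", target_lang="zh_Hant"):
--     known = [f for f in FIELD_EXPORT_ORDER if f in fields]
--     extras = sorted(k for k in fields if k not in FIELD_EXPORT_ORDER)
--     doc = (
--         "# Translation\n"
--         "\n"
--         f"- UUID: `{entity_uuid}`\n"
--         f"- Event Type: `{event_type}`\n"
--         f"- Edit only the `Translation ({target_lang})` blocks below.\n"
--     )
--     for field in known + extras:
--         values = fields[field]
--         doc += (
--             f"\n## {field}\n"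
--             f"\n### Source ({source_lang})\n"
--             "\n~~~text\n"
--             f"{values.get('msgid', '')}\n"
--             "~~~\n"
--             f"\n### Translation ({target_lang})\n"
--             "\n~~~text\n"
--             f"{values.get('msgstr', '')}\n"
--             "~~~\n"
--         )
--     return doc.rstrip() + "\n"
-- ===== Notes on version B (the rewrite author's own statement) =====
-- stated objective: alternative
-- what changed: B replaces A's single sorted() over all keys with a lexicographic tuple key by a partition-and-merge ordering (scan FIELD_EXPORT_ORDER for present keys, sort only the unknown keys alphabetically) and builds the document by direct string concatenation per field instead of accumulating a line list joined and split at the end.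
import Mathlib
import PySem

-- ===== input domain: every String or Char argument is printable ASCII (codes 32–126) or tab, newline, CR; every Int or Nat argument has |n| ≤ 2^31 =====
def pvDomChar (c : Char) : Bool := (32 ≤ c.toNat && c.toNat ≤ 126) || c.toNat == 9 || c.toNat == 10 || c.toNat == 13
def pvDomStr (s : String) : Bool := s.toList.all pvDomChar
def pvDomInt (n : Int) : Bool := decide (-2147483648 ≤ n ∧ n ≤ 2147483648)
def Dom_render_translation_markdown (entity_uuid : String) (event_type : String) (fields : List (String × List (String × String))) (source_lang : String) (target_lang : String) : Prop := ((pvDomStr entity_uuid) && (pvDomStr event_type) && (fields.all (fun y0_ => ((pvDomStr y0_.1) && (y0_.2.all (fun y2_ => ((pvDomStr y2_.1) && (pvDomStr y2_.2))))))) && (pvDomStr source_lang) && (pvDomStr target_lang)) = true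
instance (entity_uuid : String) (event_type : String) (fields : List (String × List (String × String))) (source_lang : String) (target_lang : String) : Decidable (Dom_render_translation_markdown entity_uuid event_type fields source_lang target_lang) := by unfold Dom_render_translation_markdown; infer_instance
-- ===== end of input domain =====

-- B replaces A's single sorted() over all keys (tuple key (export-index-or-len, name)) by a
-- partition: scan FIELD_EXPORT_ORDER for present keys, sort only the remaining keys
-- alphabetically, and build the document by direct string concatenation instead of a
-- line list joined at the end.  Objective: alternative decomposition, same cost.
-- Return-value equivalence only (neither version mutates its arguments).

-- ===== PORT A =====
def pvFEO : List String := ["title", "label", "text", "advice", "description", "name", "url"]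

-- A's sort key: (FIELD_EXPORT_ORDER.index(field) if field in FIELD_EXPORT_ORDER else len(FIELD_EXPORT_ORDER), field)
def pvKey1 (field : String) : Int :=
  if pvFEO.contains field then (((PySem.List.index? pvFEO field).getD 0 : Nat) : Int)
  else PySem.List.len pvFEO

def sort_fields (fields : List String) : List String :=
  PySem.List.sorted2 fields pvKey1 (fun field => field)

def render_translation_markdown (entity_uuid : String) (event_type : String) (fields : List (String × List (String × String))) (source_lang : String) (target_lang : String) : String :=
  let d := PySem.Dict.ofList fields
  let ordered_fields := sort_fields d.keys
  let lines : List String :=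
    [ "# Translation", "",
      "- UUID: `" ++ entity_uuid ++ "`",
      "- Event Type: `" ++ event_type ++ "`",
      "- Edit only the `Translation (" ++ target_lang ++ ")` blocks below.",
      "" ]
  let lines := ordered_fields.foldl (fun ls field =>
    let values := PySem.Dict.ofList (d.getD field [])
    ls ++
      [ "## " ++ field, "",
        "### Source (" ++ source_lang ++ ")", "",
        "~~~text", values.getD "msgid" "", "~~~", "",
        "### Translation (" ++ target_lang ++ ")", "",
        "~~~text", values.getD "msgstr" "", "~~~", "" ]) lines
  PySem.Str.rstrip (PySem.Str.join "\n" lines) ++ "\n"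

-- ===== PORT B =====
def render_translation_markdown_alt (entity_uuid : String) (event_type : String) (fields : List (String × List (String × String))) (source_lang : String) (target_lang : String) : String :=
  let d := PySem.Dict.ofList fields
  let known := pvFEO.filter (fun f => d.contains f)
  let extras := PySem.List.sorted (d.keys.filter (fun k => !pvFEO.contains k)) (fun x => x) false
  let doc := "# Translation\n\n- UUID: `" ++ entity_uuid ++ "`\n- Event Type: `" ++ event_type
      ++ "`\n- Edit only the `Translation (" ++ target_lang ++ ")` blocks below.\n"
  let doc := (known ++ extras).foldl (fun doc field =>
    let values := PySem.Dict.ofList (d.getD field [])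
    doc ++ ("\n## " ++ field ++ "\n\n### Source (" ++ source_lang ++ ")\n\n~~~text\n"
      ++ values.getD "msgid" "" ++ "\n~~~\n\n### Translation (" ++ target_lang
      ++ ")\n\n~~~text\n" ++ values.getD "msgstr" "" ++ "\n~~~\n")) doc
  PySem.Str.rstrip doc ++ "\n"

-- ===== PRECONDITION & SPEC =====
def Spec_render_translation_markdown (entity_uuid : String) (event_type : String) (fields : List (String × List (String × String))) (source_lang : String) (target_lang : String) (out : String) : Prop := out = render_translation_markdown_alt entity_uuid event_type fields source_lang target_lang
instance (entity_uuid : String) (event_type : String) (fields : List (String × List (String × String))) (source_lang : String) (target_lang : String) (out : String) : Decidable (Spec_render_translation_markdown entity_uuid event_type fields source_lang target_lang out) := by unfold Spec_render_translation_markdown; infer_instance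

-- ===== CLAIM (what is proved, stated in full; the proofs are below) =====
def Claim_equal_render_translation_markdown : Prop := ∀ (entity_uuid : String) (event_type : String) (fields : List (String × List (String × String))) (source_lang : String) (target_lang : String), Dom_render_translation_markdown entity_uuid event_type fields source_lang target_lang → Spec_render_translation_markdown entity_uuid event_type fields source_lang target_lang (render_translation_markdown entity_uuid event_type fields source_lang target_lang)

-- ===== LEMMAS AND PROOFS =====

-- A's lex sort key, packaged as a single LinearOrder key
def pvKey (f : String) : Lex (Int × String) := toLex (pvKey1 f, f)

-- sorted2 with keys (k1, k2) is sorted with the lexicographic key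
theorem pv_sorted2_eq_sorted_lex {α : Type} (xs : List α) (k1 : α → Int) (k2 : α → String) :
    PySem.List.sorted2 xs k1 k2 false = PySem.List.sorted xs (fun x => toLex (k1 x, k2 x)) false := by
  unfold PySem.List.sorted2 PySem.List.sorted
  simp only [if_neg (by decide : ¬ (false = true))]
  congr 1
  funext acc x
  congr 1
  funext a b
  rcases lt_trichotomy (k1 a) (k1 b) with h | h | h
  · simp [h, Prod.Lex.lt_iff]
  · simp [h, Prod.Lex.lt_iff]
  · have h1 : ¬ k1 a < k1 b := not_lt.2 (le_of_lt h)
    have h2 : k1 a ≠ k1 b := ne_of_gt h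
    simp [h, h1, h2, Prod.Lex.lt_iff]

theorem pv_mem_feo_key1 (a : String) (ha : a ∈ pvFEO) : pvKey1 a < 7 := by
  fin_cases ha <;> decide

theorem pv_not_mem_feo_key1 (a : String) (ha : a ∉ pvFEO) : pvKey1 a = 7 := by
  have hc : ¬ pvFEO.contains a = true := by simpa using ha
  rw [pvKey1, if_neg hc]
  decide

-- the ordering lemma: A's single sort equals B's partition
theorem pv_ordered_eq (fields : List (String × List (String × String))) :
    sort_fields (PySem.Dict.ofList fields).keys =
      pvFEO.filter (fun f => (PySem.Dict.ofList fields).contains f) ++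
      PySem.List.sorted ((PySem.Dict.ofList fields).keys.filter (fun k => !pvFEO.contains k)) (fun x => x) false := by
  set d := PySem.Dict.ofList fields with hd
  set known := pvFEO.filter (fun f => d.contains f) with hknown
  set extras := PySem.List.sorted (d.keys.filter (fun k => !pvFEO.contains k)) (fun x => x) false with hextras
  have hkeysnd : d.keys.Nodup := by rw [hd]; exact PySem.Dict.nodup_keys_ofList fields
  have hknown_sub : known.Sublist pvFEO := List.filter_sublist
  have hknownnd : known.Nodup := hknown_sub.nodup (by decide)
  have hextras_perm : extras.Perm (d.keys.filter (fun k => !pvFEO.contains k)) :=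
    PySem.List.sorted_perm _ _ _
  have hextrasnd : extras.Nodup := hextras_perm.nodup_iff.2 (hkeysnd.filter _)
  have hmem_known : ∀ x, x ∈ known ↔ x ∈ pvFEO ∧ x ∈ d.keys := by
    intro x
    simp [hknown, List.mem_filter, PySem.Dict.contains_iff_mem_keys]
  have hmem_extras : ∀ x, x ∈ extras ↔ x ∈ d.keys ∧ x ∉ pvFEO := by
    intro x
    rw [hextras, PySem.List.mem_sorted]
    simp [List.mem_filter]
  have hperm : (known ++ extras).Perm d.keys := by
    apply List.perm_of_nodup_nodup_toFinset_eq
    · refine List.Nodup.append hknownnd hextrasnd ?_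
      intro x hx1 hx2
      exact ((hmem_extras x).1 hx2).2 ((hmem_known x).1 hx1).1
    · exact hkeysnd
    · apply Finset.ext
      intro x
      simp only [List.mem_toFinset, List.mem_append, hmem_known, hmem_extras]
      tauto
  have hpw : List.Pairwise (fun a b => pvKey a < pvKey b) (known ++ extras) := by
    rw [List.pairwise_append]
    refine ⟨?_, ?_, ?_⟩
    · -- within known: ordered by the export index
      have hbase : List.Pairwise (fun a b => pvKey1 a < pvKey1 b) pvFEO := by decide
      exact (hbase.sublist hknown_sub).imp (fun h => by
        simp [pvKey, Prod.Lex.lt_iff]; left; exact h)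
    · -- within extras: keys outside pvFEO, alphabetical and distinct
      have hle : List.Pairwise (fun a b : String => a ≤ b) extras :=
        PySem.List.sorted_pairwise _ _
      have hne : List.Pairwise (fun a b : String => a ≠ b) extras := hextrasnd
      have hlt : List.Pairwise (fun a b : String => a < b) extras :=
        (hle.and hne).imp (fun ⟨h1, h2⟩ => lt_of_le_of_ne h1 h2)
      refine hlt.imp_of_mem (fun {a b} ha hb h => ?_)
      have ha7 := pv_not_mem_feo_key1 a ((hmem_extras a).1 ha).2
      have hb7 := pv_not_mem_feo_key1 b ((hmem_extras b).1 hb).2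
      simp [pvKey, Prod.Lex.lt_iff, ha7, hb7, h]
    · -- across: any known field sorts before any extra field
      intro a ha b hb
      have ha7 := pv_mem_feo_key1 a ((hmem_known a).1 ha).1
      have hb7 := pv_not_mem_feo_key1 b ((hmem_extras b).1 hb).2
      simp [pvKey, Prod.Lex.lt_iff]
      left; omega
  calc sort_fields d.keys
      = PySem.List.sorted d.keys pvKey false := by
        rw [sort_fields, pv_sorted2_eq_sorted_lex]; rfl
    _ = known ++ extras := PySem.List.sorted_eq_of_perm_of_pairwise_lt _ _ _ hperm hpw

-- String-level join lemmas
theorem pv_str_ext {a b : String} (h : a.toList = b.toList) : a = b := by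
  have := congrArg String.ofList h
  simpa [String.ofList_toList] using this

theorem pv_sjoin_singleton (sep a : String) : PySem.Str.join sep [a] = a := by
  calc PySem.Str.join sep [a]
      = String.ofList (PySem.Str.join sep [a]).toList := String.ofList_toList.symm
    _ = String.ofList a.toList := by
        rw [PySem.Str.toList_join]; simp [PySem.Chars.join_singleton]
    _ = a := String.ofList_toList

theorem pv_sjoin_cons_cons (sep p q : String) (rest : List String) :
    PySem.Str.join sep (p :: q :: rest) = p ++ sep ++ PySem.Str.join sep (q :: rest) := by
  have : (PySem.Str.join sep (p :: q :: rest)).toList = (p ++ sep ++ PySem.Str.join sep (q :: rest)).toList := by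
    simp [PySem.Str.toList_join, String.toList_append, PySem.Chars.join_cons_cons]
  calc PySem.Str.join sep (p :: q :: rest)
      = String.ofList (PySem.Str.join sep (p :: q :: rest)).toList := String.ofList_toList.symm
    _ = String.ofList (p ++ sep ++ PySem.Str.join sep (q :: rest)).toList := by rw [this]
    _ = _ := String.ofList_toList

theorem pv_sjoin_append (sep q : String) (rest : List String) :
    ∀ (h : List String), h ≠ [] →
      PySem.Str.join sep (h ++ q :: rest) = PySem.Str.join sep h ++ sep ++ PySem.Str.join sep (q :: rest)
  | [], hne => absurd rfl hne
  | [a], _ => by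
      rw [List.singleton_append, pv_sjoin_cons_cons, pv_sjoin_singleton]
  | a :: b :: t, _ => by
      have ih := pv_sjoin_append sep q rest (b :: t) (by simp)
      calc PySem.Str.join sep ((a :: b :: t) ++ q :: rest)
          = a ++ sep ++ PySem.Str.join sep ((b :: t) ++ q :: rest) := pv_sjoin_cons_cons ..
        _ = a ++ sep ++ (PySem.Str.join sep (b :: t) ++ sep ++ PySem.Str.join sep (q :: rest)) := by rw [ih]
        _ = _ := by rw [pv_sjoin_cons_cons]; simp [String.append_assoc]

-- B's per-field block string is "\n" ++ the join of A's per-field lines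
@[reducible] def pvBlockLines (field source_lang target_lang mi ms : String) : List String :=
  [ "## " ++ field, "",
    "### Source (" ++ source_lang ++ ")", "",
    "~~~text", mi, "~~~", "",
    "### Translation (" ++ target_lang ++ ")", "",
    "~~~text", ms, "~~~", "" ]

@[reducible] def pvBlockStr (field source_lang target_lang mi ms : String) : String :=
  "\n## " ++ field ++ "\n\n### Source (" ++ source_lang ++ ")\n\n~~~text\n"
    ++ mi ++ "\n~~~\n\n### Translation (" ++ target_lang
    ++ ")\n\n~~~text\n" ++ ms ++ "\n~~~\n"

theorem pv_block_eq (field source_lang target_lang mi ms : String) :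
    "\n" ++ PySem.Str.join "\n" (pvBlockLines field source_lang target_lang mi ms)
      = pvBlockStr field source_lang target_lang mi ms := by
  simp only [pvBlockLines, pvBlockStr, pv_sjoin_cons_cons, pv_sjoin_singleton]
  apply pv_str_ext
  simp [String.toList_append]

-- joining A's accumulated lines equals B's folded concatenation, over any field list
theorem pv_join_fold (source_lang target_lang : String)
    (g1 g2 : String → String) :
    ∀ (ks : List String) (h : List String), h ≠ [] →
      PySem.Str.join "\n" (h ++ ks.flatMap (fun f => pvBlockLines f source_lang target_lang (g1 f) (g2 f)))
        = ks.foldl (fun doc f => doc ++ pvBlockStr f source_lang target_lang (g1 f) (g2 f)) (PySem.Str.join "\n" h)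
  | [], h, hne => by simp
  | k :: ks, h, hne => by
      have hstep : PySem.Str.join "\n" (h ++ pvBlockLines k source_lang target_lang (g1 k) (g2 k))
          = PySem.Str.join "\n" h ++ pvBlockStr k source_lang target_lang (g1 k) (g2 k) := by
        rw [pv_sjoin_append "\n" _ _ h hne, String.append_assoc, pv_block_eq]
      calc PySem.Str.join "\n" (h ++ (k :: ks).flatMap (fun f => pvBlockLines f source_lang target_lang (g1 f) (g2 f)))
          = PySem.Str.join "\n" ((h ++ pvBlockLines k source_lang target_lang (g1 k) (g2 k))
              ++ ks.flatMap (fun f => pvBlockLines f source_lang target_lang (g1 f) (g2 f))) := by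
            simp [List.flatMap_cons, List.append_assoc]
        _ = ks.foldl (fun doc f => doc ++ pvBlockStr f source_lang target_lang (g1 f) (g2 f))
              (PySem.Str.join "\n" (h ++ pvBlockLines k source_lang target_lang (g1 k) (g2 k))) := by
            exact pv_join_fold source_lang target_lang g1 g2 ks _ (by simp)
        _ = _ := by rw [hstep]; rfl

-- A's header lines join to B's header literal
theorem pv_header_eq (entity_uuid event_type target_lang : String) :
    PySem.Str.join "\n"
      [ "# Translation", "",
        "- UUID: `" ++ entity_uuid ++ "`",
        "- Event Type: `" ++ event_type ++ "`",
        "- Edit only the `Translation (" ++ target_lang ++ ")` blocks below.",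
        "" ]
      = "# Translation\n\n- UUID: `" ++ entity_uuid ++ "`\n- Event Type: `" ++ event_type
          ++ "`\n- Edit only the `Translation (" ++ target_lang ++ ")` blocks below.\n" := by
  simp only [pv_sjoin_cons_cons, pv_sjoin_singleton]
  apply pv_str_ext
  simp [String.toList_append]

-- ===== VERDICT (by name: the statement is the Claim_ definition above) =====
theorem render_translation_markdown_spec : Claim_equal_render_translation_markdown := by
  intro entity_uuid event_type fields source_lang target_lang _
  unfold Spec_render_translation_markdown
  simp only [render_translation_markdown, render_translation_markdown_alt]
  rw [pv_ordered_eq fields]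
  rw [PySem.List.foldl_append_eq_flatMap]
  rw [pv_join_fold source_lang target_lang
        (fun f => (PySem.Dict.ofList ((PySem.Dict.ofList fields).getD f [])).getD "msgid" "")
        (fun f => (PySem.Dict.ofList ((PySem.Dict.ofList fields).getD f [])).getD "msgstr" "")
        _ _ (by simp)]
  rw [pv_header_eq]
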